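-- pv_equiv track=rewrite | github.com/KovalevAnd/CW2 | functions.py | tagify_content
-- ===== SOURCE A (Python) =====
-- def tagify_content(content):
--     words = content.split(' ')
--     for i, word in enumerate(words):
--         if word.startswith('#'):
--             tag = word.replace('#', '')
--             link = f'<a href="/tag/{tag}">{word}</a>'
--             words[i] = link
--     return ' '.join(words)
-- ===== SOURCE B (Python) =====
-- def _render(w):
--     if w.startswith('#'):
--         return '<a href="/tag/' + w.replace('#', '') + '">' + w + '</a>'
--     return w
--
--
-- def tagify_content(content):
--     # single pass over the characters: accumulate the current space-separated
--     # word, render it whenever a space (or the end) is reached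
--     out = []
--     word = []
--     for ch in content:
--         if ch == ' ':
--             out.append(_render(''.join(word)))
--             out.append(' ')
--             word = []
--         else:
--             word.append(ch)
--     out.append(_render(''.join(word)))
--     return ''.join(out)
-- ===== Notes on version B (the rewrite author's own statement) =====
-- stated objective: alternative
-- what changed: Replaced split-into-words / index-mutating loop / join with a single character-by-character pass that accumulates the current word and renders it at each space or at the end.
import Mathlib
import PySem

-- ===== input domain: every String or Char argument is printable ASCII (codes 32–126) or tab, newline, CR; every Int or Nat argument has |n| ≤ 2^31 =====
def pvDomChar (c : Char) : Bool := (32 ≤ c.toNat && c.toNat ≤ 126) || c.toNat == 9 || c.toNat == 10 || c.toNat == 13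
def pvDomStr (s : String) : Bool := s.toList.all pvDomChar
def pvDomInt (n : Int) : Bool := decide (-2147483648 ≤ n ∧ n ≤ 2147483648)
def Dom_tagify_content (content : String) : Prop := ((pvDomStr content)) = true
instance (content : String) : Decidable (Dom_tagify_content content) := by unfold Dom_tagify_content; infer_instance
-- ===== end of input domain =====

-- B replaces A's split/mutate/join over a word list by a single character scan; objective: alternative decomposition, same cost.

-- ===== PORT A =====
def tagify_content (content : String) : String :=
  let words := PySem.Chars.splitOn content.toList [' ']
  -- the enumerate loop rewrites each word in place: words[i] = link when it starts with '#'
  let words := words.map (fun word =>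
    if PySem.Chars.startswith word ['#'] then
      "<a href=\"/tag/".toList ++ PySem.Chars.replace word ['#'] [] ++ "\">".toList ++ word ++ "</a>".toList
    else word)
  String.ofList (PySem.Chars.join [' '] words)

-- ===== PORT B =====
-- Source B's _render
def pvRenderB (w : List Char) : List Char :=
  if PySem.Chars.startswith w ['#'] then
    "<a href=\"/tag/".toList ++ PySem.Chars.replace w ['#'] [] ++ "\">".toList ++ w ++ "</a>".toList
  else w

-- Source B's single pass: `word` is the current word accumulator, the emitted output is returned directly
def pvScanB (word : List Char) : List Char → List Char
  | [] => pvRenderB word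
  | c :: rest =>
      if c = ' ' then pvRenderB word ++ ' ' :: pvScanB [] rest
      else pvScanB (word ++ [c]) rest

def tagify_content_alt (content : String) : String :=
  String.ofList (pvScanB [] content.toList)

-- ===== PRECONDITION & SPEC =====
def Spec_tagify_content (content : String) (out : String) : Prop := out = tagify_content_alt content
instance (content : String) (out : String) : Decidable (Spec_tagify_content content out) := by unfold Spec_tagify_content; infer_instance

-- ===== CLAIM (what is proved, stated in full; the proofs are below) =====
def Claim_equal_tagify_content : Prop := ∀ (content : String), Dom_tagify_content content → Spec_tagify_content content (tagify_content content)

-- ===== LEMMAS AND PROOFS =====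

-- structural characterisation of splitting on a single space (proof helper only)
def pvSplit (word : List Char) : List Char → List (List Char)
  | [] => [word]
  | c :: rest => if c = ' ' then word :: pvSplit [] rest else pvSplit (word ++ [c]) rest

theorem pvSplit_ne_nil (word : List Char) (l : List Char) : pvSplit word l ≠ [] := by
  induction l generalizing word with
  | nil => simp [pvSplit]
  | cons c rest ih => simp only [pvSplit]; split <;> simp [ih]

theorem splitOn_go_eq_pvSplit (l : List Char) :
    ∀ (fuel : Nat) (cur : List Char) (acc : List (List Char)), l.length ≤ fuel →
      PySem.Chars.splitOn.go [' '] fuel l cur acc = acc.reverse ++ pvSplit cur.reverse l := by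
  induction l with
  | nil =>
    intro fuel cur acc _
    cases fuel <;> simp [PySem.Chars.splitOn.go, pvSplit]
  | cons c rest ih =>
    intro fuel cur acc h
    cases fuel with
    | zero => simp at h
    | succ f =>
      simp only [PySem.Chars.splitOn.go]
      by_cases hc : c = ' '
      · subst hc
        simp only [List.isPrefixOf, List.length_cons] at *
        rw [if_pos (by simp)]
        simp only [List.drop_succ_cons, List.length_nil, List.drop_zero]
        rw [ih f [] (cur.reverse :: acc) (by omega)]
        simp [pvSplit]
      · rw [if_neg (by simp [List.isPrefixOf]; exact fun h => absurd h.symm hc)]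
        rw [ih f (c :: cur) acc (by simpa using Nat.le_of_succ_le_succ h)]
        simp [pvSplit, hc]

theorem splitOn_eq_pvSplit (cs : List Char) :
    PySem.Chars.splitOn cs [' '] = pvSplit [] cs := by
  unfold PySem.Chars.splitOn
  rw [splitOn_go_eq_pvSplit cs (cs.length + 1) [] [] (by omega)]
  simp

theorem pvScanB_eq_join (cs : List Char) :
    ∀ word, pvScanB word cs = PySem.Chars.join [' '] ((pvSplit word cs).map pvRenderB) := by
  induction cs with
  | nil => intro word; simp [pvScanB, pvSplit, PySem.Chars.join, List.intercalate]
  | cons c rest ih =>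
    intro word
    by_cases hc : c = ' '
    · subst hc
      simp only [pvScanB, pvSplit, if_true]
      rw [ih []]
      obtain ⟨a, t, ht⟩ : ∃ a t, pvSplit [] rest = a :: t := by
        cases h : pvSplit ([] : List Char) rest with
        | nil => exact absurd h (pvSplit_ne_nil _ _)
        | cons a t => exact ⟨a, t, rfl⟩
      simp only [ht, List.map_cons, PySem.Chars.join_cons_cons]
      simp
    · simp only [pvScanB, pvSplit, if_neg hc]
      exact ih (word ++ [c])

-- ===== VERDICT (by name: the statement is the Claim_ definition above) =====
theorem tagify_content_spec : Claim_equal_tagify_content := by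
  intro content _
  unfold Spec_tagify_content tagify_content tagify_content_alt
  rw [splitOn_eq_pvSplit, pvScanB_eq_join]
  rfl
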